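-- pv_equiv track=rewrite | github.com/dmlcksghd/coding_practice | L1_문자열_나누기.py | solution
-- ===== SOURCE A (Python) =====
-- def solution(s):
--     count = 0
--     balance = 0
--
--     for word in s:
--         if balance == 0:
--             count += 1
--             x = word
--
--         if word == x:
--             balance += 1
--         else:
--             balance -= 1
--
--     return count
-- ===== SOURCE B (Python) =====
-- def solution(s):
--     count = 0
--     while s:
--         count += 1
--         x = s[0]
--         L = len(s)
--         for k in range(2, len(s) + 1, 2):
--             if 2 * s.count(x, 0, k) == k:
--                 L = k
--                 break
--         s = s[L:]
--     return count
-- ===== Notes on version B (the rewrite author's own statement) =====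
-- stated objective: alternative
-- what changed: Replaces A's single character-by-character scan with a mutable +/-1 balance and leader flag by count-based group extraction: for each group it searches the first even prefix length k with s.count(x, 0, k) * 2 == k (leader occurrences fill exactly half the prefix), slices that group off the front, and repeats.
import Mathlib
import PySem

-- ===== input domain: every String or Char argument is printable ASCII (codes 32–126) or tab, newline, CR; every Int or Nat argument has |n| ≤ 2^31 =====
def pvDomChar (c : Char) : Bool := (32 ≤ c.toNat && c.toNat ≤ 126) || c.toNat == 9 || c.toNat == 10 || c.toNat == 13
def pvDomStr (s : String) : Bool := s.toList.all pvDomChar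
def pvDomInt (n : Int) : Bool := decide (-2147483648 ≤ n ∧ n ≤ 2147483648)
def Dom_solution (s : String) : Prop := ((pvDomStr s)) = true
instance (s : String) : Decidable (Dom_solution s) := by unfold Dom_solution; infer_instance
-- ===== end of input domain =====

-- B replaces A's running ±1-balance scan by count-based group extraction (searches the
-- first even prefix length k with s.count(x,0,k)*2 == k, then slices the group off);
-- objective: alternative (same answer, different algorithmic mechanism, not faster).

-- ===== PORT A =====
-- A's loop state: (count, balance, x); x's initial value is never read (Python's x
-- is only read after the balance==0 branch assigned it on the first iteration).
def stepA (st : Int × Int × Char) (c : Char) : Int × Int × Char :=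
  let count := st.1
  let bal := st.2.1
  let x := st.2.2
  let cx : Int × Char := if bal = 0 then (count + 1, c) else (count, x)
  let bal' : Int := if c = cx.2 then bal + 1 else bal - 1
  (cx.1, bal', cx.2)

def solution (s : String) : Int :=
  (s.toList.foldl stepA (0, 0, 'a')).1

-- ===== PORT B =====
-- inner `for k in range(2, len(s)+1, 2): if 2*s.count(x,0,k) == k: L = k; break` with
-- fallback L = len(s): first candidate k passing the count test, else the length.
-- (s.count(x,0,k) with the 1-character x counts occurrences of the char x in s[:k];
-- ported exactly as List.count over that slice.)
def findK (l : List Char) (x : Char) : List Int → Int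
  | [] => (l.length : Int)
  | k :: ks =>
    if 2 * (((PySem.List.slice l none (some k)).count x : Nat) : Int) = k then k
    else findK l x ks

-- termination facts for the outer while loop (cited by decreasing_by below)
theorem findK_pos (l : List Char) (x : Char) (hl : l ≠ []) :
    ∀ ks : List Int, (∀ k ∈ ks, 1 ≤ k) → 1 ≤ findK l x ks := by
  intro ks
  induction ks with
  | nil =>
    intro _
    simp only [findK]
    have : 1 ≤ l.length := List.length_pos_iff.mpr hl
    omega
  | cons k ks ih =>
    intro h
    simp only [findK]
    split
    · exact h k (by simp)
    · exact ih (fun k' hk' => h k' (by simp [hk']))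

theorem slice_from_pos_length_lt (l : List Char) (L : Int) (hL : 1 ≤ L) (hl : l ≠ []) :
    (PySem.List.slice l (some L) none).length < l.length := by
  rw [PySem.List.slice_from l (by omega : (0:Int) ≤ L)]
  have h1 : 1 ≤ L.toNat := by omega
  have h2 : 1 ≤ l.length := List.length_pos_iff.mpr hl
  simp only [List.length_drop]
  omega

-- outer `while s:` loop of Source B: count one group, slice it off, continue on the rest
def solBgo : List Char → Int
  | [] => 0
  | c :: rest =>
    let L := findK (c :: rest) c
      (PySem.List.pyRange 2 (((c :: rest).length : Int) + 1) 2)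
    1 + solBgo (PySem.List.slice (c :: rest) (some L) none)
termination_by l => l.length
decreasing_by
  exact slice_from_pos_length_lt _ _
    (findK_pos _ _ (List.cons_ne_nil _ _) _
      (fun k hk => by
        have := (PySem.List.mem_pyRange_iff_of_pos (by norm_num) k).mp hk
        omega))
    (List.cons_ne_nil _ _)

def solution_alt (s : String) : Int :=
  solBgo s.toList

-- ===== PRECONDITION & SPEC =====
def Spec_solution (s : String) (out : Int) : Prop := out = solution_alt s
instance (s : String) (out : Int) : Decidable (Spec_solution s out) := by unfold Spec_solution; infer_instance

-- ===== CLAIM (what is proved, stated in full; the proofs are below) =====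
def Claim_equal_solution : Prop := ∀ (s : String), Dom_solution s → Spec_solution s (solution s)

-- ===== LEMMAS AND PROOFS =====

-- Proof-side bridge: the group that A's balance scan crosses (leader x, running
-- balance bal > 0) leaves exactly this suffix unconsumed.
def consumeGroup (x : Char) (bal : Int) : List Char → List Char
  | [] => []
  | c :: rest =>
    if bal + (if c = x then 1 else -1) = 0 then rest
    else consumeGroup x (bal + (if c = x then 1 else -1)) rest

theorem consumeGroup_len (x : Char) (bal : Int) (l : List Char) :
    (consumeGroup x bal l).length ≤ l.length := by
  induction l generalizing bal with
  | nil => simp [consumeGroup]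
  | cons c rest ih =>
    simp only [consumeGroup, List.length_cons]
    split_ifs <;> first | exact Nat.le_succ _ | exact Nat.le_succ_of_le (ih _)

def countGroups : List Char → Int
  | [] => 0
  | c :: rest => 1 + countGroups (consumeGroup c 1 rest)
termination_by l => l.length
decreasing_by
  exact Nat.lt_succ_of_le (consumeGroup_len c 1 rest)

-- step-2 range induction forms (step ≠ 1, so derived here from pyRange_of_pos)
theorem pyRange_two_nil (a b : Int) (h : b ≤ a) : PySem.List.pyRange a b 2 = [] := by
  rw [PySem.List.pyRange_of_pos a b (by norm_num)]
  rw [if_neg (by omega)]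
  simp

theorem pyRange_two_cons (a b : Int) (h : a < b) :
    PySem.List.pyRange a b 2 = a :: PySem.List.pyRange (a + 2) b 2 := by
  rw [PySem.List.pyRange_of_pos a b (by norm_num),
      PySem.List.pyRange_of_pos (a + 2) b (by norm_num)]
  rw [if_pos h]
  by_cases h2 : a + 2 < b
  · rw [if_pos h2]
    have hn : ((b - a + 2 - 1) / 2).toNat = ((b - (a + 2) + 2 - 1) / 2).toNat + 1 := by
      omega
    rw [hn, List.range_succ_eq_map]
    simp only [List.map_cons, List.map_map]
    congr 1
    · simp
    · exact List.map_congr_left (fun k _ => by simp [Function.comp]; ring)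
  · rw [if_neg h2]
    have hn : ((b - a + 2 - 1) / 2).toNat = 1 := by omega
    rw [hn]
    simp

-- Main invariant for A: inside a group (bal > 0), A's fold counts the groups of the
-- suffix that the group-consumption leaves behind.
theorem foldA_inv : ∀ (n : ℕ) (l : List Char), l.length ≤ n →
    ∀ (count bal : Int) (x : Char), 0 < bal →
    (List.foldl stepA (count, bal, x) l).1 = count + countGroups (consumeGroup x bal l) := by
  intro n
  induction n with
  | zero =>
    intro l hl count bal x _
    have : l = [] := List.eq_nil_of_length_eq_zero (Nat.le_zero.mp hl)
    subst this
    simp [consumeGroup, countGroups]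
  | succ n ih =>
    intro l hl count bal x hbal
    cases l with
    | nil => simp [consumeGroup, countGroups]
    | cons c rest =>
      have hbne : bal ≠ 0 := by omega
      have hrest : rest.length ≤ n := by simpa using Nat.succ_le_succ_iff.mp hl
      have hstep : stepA (count, bal, x) c =
          (count, bal + (if c = x then 1 else -1), x) := by
        simp only [stepA, if_neg hbne]
        by_cases h : c = x
        · simp [h]
        · simp [h, sub_eq_add_neg]
      rw [List.foldl_cons, hstep]
      simp only [consumeGroup]
      set b' : Int := bal + (if c = x then 1 else -1) with hb'
      by_cases h0 : b' = 0
      · rw [if_pos h0, h0]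
        cases rest with
        | nil => simp [countGroups]
        | cons d rest2 =>
          have hstep0 : stepA (count, 0, x) d = (count + 1, 1, d) := by
            simp [stepA]
          rw [List.foldl_cons, hstep0]
          have hr2 : rest2.length ≤ n := by
            simp at hrest; omega
          rw [ih rest2 hr2 (count + 1) 1 d (by omega)]
          simp only [countGroups]
          ring
      · rw [if_neg h0]
        have hb'pos : 0 < b' := by
          have h := hb'
          split at h <;> omega
        exact ih rest hrest count b' x hb'pos

-- Main invariant for B: mid-group (i characters of g consumed, i odd, balance bal > 0),
-- the first even prefix length passing B's count test cuts g exactly where A's balance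
-- scan leaves the group (or, when the balance never returns to 0, both consume all of g).
theorem findK_drop : ∀ (n : ℕ) (rest g : List Char) (i : ℕ) (x : Char) (bal : Int),
    rest.length ≤ n → rest = g.drop i →
    bal = 2 * ((g.take i).count x : Int) - (i : Int) →
    i % 2 = 1 → 0 < bal →
    g.drop (findK g x (PySem.List.pyRange ((i : Int) + 1) ((g.length : Int) + 1) 2)).toNat
      = consumeGroup x bal rest := by
  intro n
  induction n with
  | zero =>
    intro rest g i x bal hn hrest _ _ _
    have hr : rest = [] := List.eq_nil_of_length_eq_zero (Nat.le_zero.mp hn)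
    subst hr
    have hlen : g.length ≤ i := by
      have := congrArg List.length hrest
      simp [List.length_drop] at this
      omega
    rw [pyRange_two_nil _ _ (by omega)]
    simp only [findK, consumeGroup]
    simp
  | succ n ih =>
    intro rest g i x bal hn hrest hbal hodd hpos
    cases rest with
    | nil =>
      have hlen : g.length ≤ i := by
        have := congrArg List.length hrest
        simp [List.length_drop] at this
        omega
      rw [pyRange_two_nil _ _ (by omega)]
      simp only [findK, consumeGroup]
      simp
    | cons c1 rest' =>
      have hi : i < g.length := by
        by_contra hge
        rw [List.drop_eq_nil_of_le (by omega)] at hrest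
        exact List.cons_ne_nil _ _ hrest
      have htake1 : g.take (i + 1) = g.take i ++ [c1] := by
        rw [List.take_add, ← hrest]
        simp
      have hdrop1 : g.drop (i + 1) = rest' := by
        have h11 : g.drop (i + 1) = (g.drop i).drop 1 := by
          rw [List.drop_drop]
        rw [h11, ← hrest]
        simp
      have hcount1 : ((g.take (i + 1)).count x : Int)
          = ((g.take i).count x : Int) + (if c1 = x then 1 else 0) := by
        rw [htake1, List.count_append]
        by_cases h : c1 = x <;> simp [h]
      -- the range is nonempty: first candidate is i+1
      rw [pyRange_two_cons _ _ (by omega)]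
      simp only [findK]
      rw [PySem.List.slice_to g (by positivity : (0:Int) ≤ (i:Int)+1)]
      have htn : ((i : Int) + 1).toNat = i + 1 := by omega
      rw [htn]
      set b' : Int := bal + (if c1 = x then 1 else -1) with hb'
      have hcond : (2 * (((g.take (i + 1)).count x : Nat) : Int) = (i : Int) + 1) ↔ b' = 0 := by
        rw [hcount1]
        by_cases h : c1 = x <;> simp [h, hb', hbal] <;> omega
      simp only [consumeGroup, ← hb']
      by_cases h0 : b' = 0
      · rw [if_pos (hcond.mpr h0), if_pos h0, htn, hdrop1]
      · rw [if_neg (fun hh => h0 (hcond.mp hh)), if_neg h0]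
        cases rest' with
        | nil =>
          -- g ends right after c1: the remaining range is empty, both sides are []
          have hlen : g.length = i + 1 := by
            have := congrArg List.length hdrop1
            simp [List.length_drop] at this
            omega
          rw [pyRange_two_nil _ _ (by omega)]
          simp only [findK, consumeGroup]
          simp
        | cons c2 rest2 =>
          have htake2 : g.take (i + 2) = g.take (i + 1) ++ [c2] := by
            have h12 : i + 2 = (i + 1) + 1 := by omega
            rw [h12, List.take_add, hdrop1]
            simp
          have hdrop2 : g.drop (i + 2) = rest2 := by
            have h12 : g.drop (i + 2) = (g.drop (i + 1)).drop 1 := by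
              rw [List.drop_drop]
            rw [h12, hdrop1]
            simp
          have hcount2 : ((g.take (i + 2)).count x : Int)
              = ((g.take (i + 1)).count x : Int) + (if c2 = x then 1 else 0) := by
            rw [htake2, List.count_append]
            by_cases h : c2 = x <;> simp [h]
          have hb'pos : 0 < b' := by
            by_cases h : c1 = x <;> simp [h] at hb' <;> omega
          simp only [consumeGroup]
          set b'' : Int := b' + (if c2 = x then 1 else -1) with hb''
          have hbal2 : b'' = 2 * ((g.take (i + 2)).count x : Int) - ((i + 2 : ℕ) : Int) := by
            rw [hcount2, hcount1]
            by_cases h1 : c1 = x <;> by_cases h2 : c2 = x <;>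
              simp [h1, h2, hb'', hb', hbal] <;> omega
          have hb''ne : b'' ≠ 0 := by
            -- parity: i + 2 characters consumed, i odd, so b'' is odd
            have hpar := hbal2
            push_cast at hpar
            omega
          have hb''pos : 0 < b'' := by
            by_cases h : c2 = x <;> simp [h] at hb'' <;> omega
          rw [if_neg hb''ne]
          have hrange : ((i : Int) + 1) + 2 = ((i + 2 : ℕ) : Int) + 1 := by push_cast; ring
          rw [hrange]
          exact ih rest2 g (i + 2) x b''
            (by simp at hn; omega) hdrop2.symm hbal2 (by omega) hb''pos

-- B computes countGroups: each outer iteration of Source B removes exactly one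
-- balance-group from the front.
theorem solBgo_eq_countGroups : ∀ (n : ℕ) (l : List Char), l.length ≤ n →
    solBgo l = countGroups l := by
  intro n
  induction n with
  | zero =>
    intro l hl
    have : l = [] := List.eq_nil_of_length_eq_zero (Nat.le_zero.mp hl)
    subst this
    simp [solBgo, countGroups]
  | succ n ih =>
    intro l hl
    cases l with
    | nil => simp [solBgo, countGroups]
    | cons c rest =>
      rw [solBgo]
      have hL : 1 ≤ findK (c :: rest) c
          (PySem.List.pyRange 2 (((c :: rest).length : Int) + 1) 2) :=
        findK_pos _ _ (List.cons_ne_nil _ _) _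
          (fun k hk => by
            have := (PySem.List.mem_pyRange_iff_of_pos (by norm_num) k).mp hk
            omega)
      rw [PySem.List.slice_from (c :: rest) (by omega : (0:Int) ≤ _)]
      have hmain : (c :: rest).drop (findK (c :: rest) c
          (PySem.List.pyRange 2 (((c :: rest).length : Int) + 1) 2)).toNat
          = consumeGroup c 1 rest := by
        have h2 : ((1 : ℕ) : Int) + 1 = 2 := by norm_num
        rw [← h2]
        exact findK_drop rest.length rest (c :: rest) 1 c 1 le_rfl (by simp)
          (by simp) (by norm_num) (by norm_num)
      rw [hmain]
      rw [ih _ (le_trans (consumeGroup_len c 1 rest) (by simpa using Nat.succ_le_succ_iff.mp hl))]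
      rw [countGroups]

-- ===== VERDICT (by name: the statement is the Claim_ definition above) =====
theorem solution_spec : Claim_equal_solution := by
  intro s _
  unfold Spec_solution solution solution_alt
  rw [solBgo_eq_countGroups s.toList.length _ le_rfl]
  cases hl : s.toList with
  | nil => simp [countGroups]
  | cons c rest =>
    have hstep0 : stepA (0, 0, 'a') c = (1, 1, c) := by simp [stepA]
    rw [List.foldl_cons, hstep0]
    rw [foldA_inv rest.length rest le_rfl 1 1 c (by omega)]
    simp only [countGroups]
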